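-- pv_equiv track=rewrite | github.com/davidlougheed/strkit | strkit/call/utils.py | find_pair_by_ref_pos_py
-- ===== SOURCE A (Python) =====
-- def find_pair_by_ref_pos_py(pairs: list[tuple[int, int]], target: int, start_left: int = 0) -> tuple[int, bool]:
--     lhs: int = start_left
--     rhs: int = len(pairs) - 1
--
--     while lhs <= rhs:
--         pivot: int = (lhs + rhs) // 2
--         pair: tuple[int, int] = pairs[pivot]
--         if pair[1] < target:
--             lhs = pivot + 1
--         elif pair[1] > target:  # pair[1] > snv_pos
--             rhs = pivot - 1
--         else:
--             return pivot, True  # Found!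
--
--     # Nothing found, so must have been a gap
--     # LHS should be the insertion point
--     return lhs, False
-- ===== SOURCE B (Python) =====
-- def find_pair_by_ref_pos_py(pairs: list[tuple[int, int]], target: int, start_left: int = 0) -> tuple[int, bool]:
--     # Recursive binary search over a HALF-OPEN interval [lo, hi) with an
--     # equality-first three-way comparison, instead of A's iterative loop over a
--     # closed interval [lhs, rhs] with less/greater checks.  The probe index
--     # (lo + hi - 1) // 2 equals A's (lhs + rhs) // 2 under hi = rhs + 1, so the
--     # probe sequence, found index and insertion point are identical.
--     def search(lo: int, hi: int) -> tuple[int, bool]: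
--         if lo >= hi:
--             return lo, False
--         mid = (lo + hi - 1) // 2
--         v = pairs[mid][1]
--         if v == target:
--             return mid, True
--         if v < target:
--             return search(mid + 1, hi)
--         return search(lo, mid)
--
--     return search(start_left, len(pairs))
-- ===== Notes on version B (the rewrite author's own statement) =====
-- stated objective: alternative
-- what changed: Replaces the iterative while-loop over a mutable closed interval [lhs, rhs] by a recursive helper over a half-open interval [lo, hi) with an equality-first three-way comparison; the probe (lo+hi-1)//2 equals (lhs+rhs)//2 under hi = rhs+1, so index, tie among duplicates and insertion point are identical.
-- outside the precondition, e.g. on find_pair_by_ref_pos_py([(0, 3), (1, 7)], 3, -4): A returns (-2, True), B returns (-2, True); on find_pair_by_ref_pos_py([], 0, -1): A raises IndexError, B raises IndexError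
import Mathlib
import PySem

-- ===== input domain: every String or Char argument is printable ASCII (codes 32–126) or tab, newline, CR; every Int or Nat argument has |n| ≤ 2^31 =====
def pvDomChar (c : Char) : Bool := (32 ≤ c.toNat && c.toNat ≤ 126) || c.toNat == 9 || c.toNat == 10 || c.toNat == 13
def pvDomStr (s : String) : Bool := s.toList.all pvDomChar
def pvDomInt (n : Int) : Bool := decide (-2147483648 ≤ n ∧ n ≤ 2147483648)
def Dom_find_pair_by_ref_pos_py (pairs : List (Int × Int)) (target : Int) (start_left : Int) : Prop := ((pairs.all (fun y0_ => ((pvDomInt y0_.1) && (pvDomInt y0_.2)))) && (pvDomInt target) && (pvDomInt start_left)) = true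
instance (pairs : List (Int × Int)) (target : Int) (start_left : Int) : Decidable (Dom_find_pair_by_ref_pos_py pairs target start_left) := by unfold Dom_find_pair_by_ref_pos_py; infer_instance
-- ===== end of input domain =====

-- B: recursive binary search over a half-open interval [lo, hi) with an equality-first
-- comparison, instead of A's iterative closed-interval loop (objective: alternative,
-- identical results; return value only, no argument is mutated).

-- ===== PORT A =====
-- the while-loop of A over the mutable state (lhs, rhs); the Nat fuel only makes the
-- recursion structural and is always sufficient at the call site (fuel = span size)
def pvLoopA (pairs : List (Int × Int)) (target : Int) : Nat → Int → Int → Int × Bool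
  | 0, lhs, _rhs => (lhs, false)
  | fuel + 1, lhs, rhs =>
    if lhs ≤ rhs then
      match PySem.List.pyGet? pairs (PySem.Int.floordiv (lhs + rhs) 2) with
      | none => (0, false)  -- Python raises IndexError here; excluded by Pre_
      | some pair =>
        if pair.2 < target then
          pvLoopA pairs target fuel (PySem.Int.floordiv (lhs + rhs) 2 + 1) rhs
        else if pair.2 > target then
          pvLoopA pairs target fuel lhs (PySem.Int.floordiv (lhs + rhs) 2 - 1)
        else (PySem.Int.floordiv (lhs + rhs) 2, true)
    else (lhs, false)

def find_pair_by_ref_pos_py (pairs : List (Int × Int)) (target : Int) (start_left : Int) : Int × Bool :=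
  pvLoopA pairs target ((pairs.length : Int) - start_left).toNat start_left ((pairs.length : Int) - 1)

-- ===== PORT B =====
-- B's recursive search over the half-open interval [lo, hi); the Nat fuel only makes the
-- recursion structural and, as the interval width shrinks each call, is always sufficient
-- at the call site (fuel = initial width)
def pvSearchB (pairs : List (Int × Int)) (target : Int) (fuel : Nat) (lo hi : Int) : Int × Bool :=
  match fuel with
  | 0 => (lo, false)
  | f + 1 =>
    if lo ≥ hi then (lo, false)
    else
      let mid := PySem.Int.floordiv (lo + hi - 1) 2
      match PySem.List.pyGet? pairs mid with
      | none => (0, false)  -- Python raises IndexError here; excluded by Pre_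
      | some p =>
        if p.2 == target then (mid, true)
        else if p.2 < target then pvSearchB pairs target f (mid + 1) hi
        else pvSearchB pairs target f lo mid

def find_pair_by_ref_pos_py_alt (pairs : List (Int × Int)) (target : Int) (start_left : Int) : Int × Bool :=
  pvSearchB pairs target ((pairs.length : Int) - start_left).toNat start_left (pairs.length : Int)

-- ===== PRECONDITION & SPEC =====
-- Pre_ excludes start_left < -len(pairs), on which A either raises IndexError or returns via
-- Python's negative-index wraparound, an accident of the implementation outside the function's
-- intended domain (B behaves identically there).
def Pre_find_pair_by_ref_pos_py (pairs : List (Int × Int)) (target : Int) (start_left : Int) : Prop :=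
  -(pairs.length : Int) ≤ start_left
instance (pairs : List (Int × Int)) (target : Int) (start_left : Int) : Decidable (Pre_find_pair_by_ref_pos_py pairs target start_left) := by unfold Pre_find_pair_by_ref_pos_py; infer_instance

def pvWitness_find_pair_by_ref_pos_py : (List (Int × Int)) × Int × Int := ([(10, 3), (12, 7), (15, 9)], 7, 0)

def Spec_find_pair_by_ref_pos_py (pairs : List (Int × Int)) (target : Int) (start_left : Int) (out : Int × Bool) : Prop := out = find_pair_by_ref_pos_py_alt pairs target start_left
instance (pairs : List (Int × Int)) (target : Int) (start_left : Int) (out : Int × Bool) : Decidable (Spec_find_pair_by_ref_pos_py pairs target start_left out) := by unfold Spec_find_pair_by_ref_pos_py; infer_instance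

-- ===== CLAIM (what is proved, stated in full; the proofs are below) =====
def Claim_equal_find_pair_by_ref_pos_py : Prop := ∀ (pairs : List (Int × Int)) (target : Int) (start_left : Int), Dom_find_pair_by_ref_pos_py pairs target start_left → Pre_find_pair_by_ref_pos_py pairs target start_left → Spec_find_pair_by_ref_pos_py pairs target start_left (find_pair_by_ref_pos_py pairs target start_left)

-- ===== LEMMAS AND PROOFS =====

-- With the same fuel the two recursions agree, the states related by hi = rhs + 1.
lemma pvLoop_eq (pairs : List (Int × Int)) (target : Int) :
    ∀ (fuel : Nat) (lhs rhs : Int), (rhs + 1 - lhs).toNat ≤ fuel →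
      pvLoopA pairs target fuel lhs rhs = pvSearchB pairs target fuel lhs (rhs + 1) := by
  intro fuel
  induction fuel with
  | zero => intro lhs rhs _; rfl
  | succ fuel ih =>
    intro lhs rhs hk
    by_cases h : lhs ≤ rhs
    · rw [pvLoopA, pvSearchB, if_pos h, if_neg (by omega : ¬ lhs ≥ rhs + 1)]
      have hmid : lhs + (rhs + 1) - 1 = lhs + rhs := by ring
      rw [hmid]
      dsimp only
      cases hg : PySem.List.pyGet? pairs (PySem.Int.floordiv (lhs + rhs) 2) with
      | none => rfl
      | some p =>
        dsimp only
        have hbnd := PySem.Int.floordiv_two_mid_bounds h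
        by_cases he : p.2 = target
        · rw [if_neg (by omega : ¬ p.2 < target), if_neg (by omega : ¬ p.2 > target),
            if_pos (by simp [he] : (p.2 == target) = true)]
        · rw [if_neg (by simp [he] : ¬ (p.2 == target) = true)]
          by_cases hlt : p.2 < target
          · rw [if_pos hlt, if_pos hlt]
            exact ih _ _ (by omega)
          · rw [if_neg hlt, if_neg hlt, if_pos (by omega : p.2 > target)]
            have h1 := ih lhs (PySem.Int.floordiv (lhs + rhs) 2 - 1) (by omega)
            have h2 : PySem.Int.floordiv (lhs + rhs) 2 - 1 + 1
                = PySem.Int.floordiv (lhs + rhs) 2 := by ring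
            rw [h2] at h1
            exact h1
    · rw [pvLoopA, pvSearchB, if_neg h, if_pos (by omega : lhs ≥ rhs + 1)]

-- ===== VERDICT (by name: the statement is the Claim_ definition above) =====
theorem find_pair_by_ref_pos_py_spec : Claim_equal_find_pair_by_ref_pos_py := by
  intro pairs target start_left _hdom _hpre
  unfold Spec_find_pair_by_ref_pos_py find_pair_by_ref_pos_py find_pair_by_ref_pos_py_alt
  have := pvLoop_eq pairs target ((pairs.length : Int) - start_left).toNat
    start_left ((pairs.length : Int) - 1) (by omega)
  rw [this]
  norm_num
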